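-- pv_equiv track=rewrite | github.com/onestone11/kosa-study-tigger | 엄마호랑이반/5주차 문제/박정환/방금그곡.py | solution
-- ===== SOURCE A (Python) =====
-- def timeto(t):
--     return int(t.split(':')[0]) * 60 + int(t.split(':')[1])
--
-- def change(music):
--     exc = {'C#':'1','D#':'2', 'F#':'3', 'G#':'4', 'A#':'5', 'B#': '6'}
--     for i, v in exc.items():
--         music = music.replace(i,v)
--     return music
--
-- def solution(m, musicinfos):
--     a = []
--     for i in musicinfos:
--         i = i.split(',')
--         i[3] = change(i[3])
--         t_d = timeto(i[1]) - timeto(i[0])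
--         if t_d >= len(i[3]):
--             M = i[3] * (t_d//len(i[3])) + i[3][:t_d % len(i[3])]
--         else:
--             M = i[3][:t_d]
--
--         if change(m) in M:
--             a.append([t_d, i[2]])
--
--     if len(a) == 0:
--         return "(None)"
--     else:
--         a.sort(key = lambda x: -x[0])
--         return a[0][1]
-- ===== SOURCE B (Python) =====
-- def timeto(t):
--     return int(t.split(':')[0]) * 60 + int(t.split(':')[1])
--
-- NOTE_DIGIT = {'C': '1', 'D': '2', 'F': '3', 'G': '4', 'A': '5', 'B': '6'}
--
-- def change(music):
--     # single left-to-right scan instead of six sequential str.replace passes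
--     out = []
--     i = 0
--     n = len(music)
--     while i < n:
--         c = music[i]
--         if c in NOTE_DIGIT and i + 1 < n and music[i + 1] == '#':
--             out.append(NOTE_DIGIT[c])
--             i += 2
--         else:
--             out.append(c)
--             i += 1
--     return ''.join(out)
--
-- def solution(m, musicinfos):
--     q = change(m)
--     best_title = "(None)"
--     best_dur = None
--     for info in musicinfos:
--         parts = info.split(',')
--         melody = change(parts[3])
--         t_d = timeto(parts[1]) - timeto(parts[0])
--         L = len(melody)
--         if t_d < L:
--             M = melody[:t_d]
--         else:
--             M = melody * (t_d // L) + melody[:t_d % L]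
--         if q in M and (best_dur is None or t_d > best_dur):
--             best_dur = t_d
--             best_title = parts[2]
--     return best_title
-- ===== Notes on version B (the rewrite author's own statement) =====
-- stated objective: simpler
-- what changed: Sharp-note substitution is done in one left-to-right scan instead of six sequential str.replace passes, the query melody is converted once before the loop instead of on every entry, and the best (duration, title) is tracked with a strict '>' update in one pass instead of collecting all matches and stable-sorting them by descending duration.
import Mathlib
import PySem

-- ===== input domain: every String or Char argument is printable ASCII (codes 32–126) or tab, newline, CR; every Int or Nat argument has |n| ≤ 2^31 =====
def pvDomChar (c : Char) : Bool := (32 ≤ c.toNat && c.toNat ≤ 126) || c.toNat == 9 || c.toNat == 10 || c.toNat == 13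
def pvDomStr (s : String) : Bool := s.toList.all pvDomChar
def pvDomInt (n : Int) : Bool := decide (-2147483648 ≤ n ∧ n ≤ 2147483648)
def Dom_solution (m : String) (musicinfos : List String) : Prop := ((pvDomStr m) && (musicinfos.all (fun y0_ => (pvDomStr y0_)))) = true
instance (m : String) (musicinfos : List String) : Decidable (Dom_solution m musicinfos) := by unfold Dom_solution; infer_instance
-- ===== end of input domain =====

-- B is a simpler one-pass rewrite: sharp substitution by a single scan (instead of six
-- sequential str.replace passes) and a running strict-max best title (instead of
-- collecting a list and stable-sorting it descending); return values proved equal on Pre_.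

-- ===== PORT A =====

-- shared helper: both Pythons contain the identical 'timeto' (none = ValueError/IndexError)
def timeto? (t : List Char) : Option Int :=
  match PySem.List.pyGet? (PySem.Chars.splitOn t [':']) 0,
        PySem.List.pyGet? (PySem.Chars.splitOn t [':']) 1 with
  | some p0, some p1 =>
    match PySem.Int.ofChars? p0, PySem.Int.ofChars? p1 with
    | some a, some b => some (a * 60 + b)
    | _, _ => none
  | _, _ => none

-- A's change: six sequential replaces, in the dict's order
def changeA (music : List Char) : List Char :=
  [(['C','#'],['1']),(['D','#'],['2']),(['F','#'],['3']),
   (['G','#'],['4']),(['A','#'],['5']),(['B','#'],['6'])].foldl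
    (fun s p => PySem.Chars.replace s p.1 p.2) music

-- A's loop body (none = the Python raises: missing field, bad time, or t_d//0)
def bodyA (m : String) (acc : Option (List (Int × List Char))) (i : String) :
    Option (List (Int × List Char)) :=
  match acc with
  | none => none
  | some a =>
    let parts := PySem.Chars.splitOn i.toList [',']
    match PySem.List.pyGet? parts 0, PySem.List.pyGet? parts 1,
          PySem.List.pyGet? parts 2, PySem.List.pyGet? parts 3 with
    | some i0, some i1, some i2, some i3r =>
      let i3 := changeA i3r
      match timeto? i1, timeto? i0 with
      | some t1, some t0 =>
        let td := t1 - t0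
        if i3.length = 0 ∧ 0 ≤ td then none   -- ZeroDivisionError in 't_d // len(i[3])'
        else
          let M := if td ≥ (i3.length : Int) then
              PySem.List.pyRepeat i3 (PySem.Int.floordiv td (i3.length : Int)) ++
                PySem.List.slice i3 none (some (PySem.Int.mod td (i3.length : Int)))
            else PySem.List.slice i3 none (some td)
          if PySem.Chars.isIn (changeA m.toList) M then some (a ++ [(td, i2)]) else some a
      | _, _ => none
    | _, _, _, _ => none

def solution (m : String) (musicinfos : List String) : String :=
  match musicinfos.foldl (bodyA m) (some []) with
  | none => ""          -- unreachable under Pre_: the Python raises there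
  | some a =>
    if a.length = 0 then "(None)"
    else String.ofList ((PySem.List.sorted a (fun x => -x.1) false).headD (0, [])).2

-- ===== PORT B =====

def isNote (c : Char) : Bool := c = 'C' || c = 'D' || c = 'F' || c = 'G' || c = 'A' || c = 'B'

def noteDigit (c : Char) : Char :=
  if c = 'C' then '1' else if c = 'D' then '2' else if c = 'F' then '3'
  else if c = 'G' then '4' else if c = 'A' then '5' else '6'

-- B's change: one left-to-right scan over the characters
def scanSharp : List Char → List Char
  | [] => []
  | [a] => [a]
  | a :: b :: r =>
    if isNote a && b == '#' then noteDigit a :: scanSharp r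
    else a :: scanSharp (b :: r)

def changeB (music : List Char) : List Char := scanSharp music

-- 'best_dur is None or t_d > best_dur'
def betterB (td : Int) : Option Int → Bool
  | none => true
  | some d => decide (d < td)

-- B's loop body, state = (best_title, best_dur)
def bodyB (q : List Char) (acc : Option (List Char × Option Int)) (info : String) :
    Option (List Char × Option Int) :=
  match acc with
  | none => none
  | some st =>
    let parts := PySem.Chars.splitOn info.toList [',']
    match PySem.List.pyGet? parts 0, PySem.List.pyGet? parts 1,
          PySem.List.pyGet? parts 2, PySem.List.pyGet? parts 3 with
    | some p0, some p1, some p2, some p3 =>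
      let melody := changeB p3
      match timeto? p1, timeto? p0 with
      | some t1, some t0 =>
        let td := t1 - t0
        if melody.length = 0 ∧ 0 ≤ td then none   -- ZeroDivisionError in 't_d // L'
        else
          let M := if td < (melody.length : Int) then PySem.List.slice melody none (some td)
            else PySem.List.pyRepeat melody (PySem.Int.floordiv td (melody.length : Int)) ++
              PySem.List.slice melody none (some (PySem.Int.mod td (melody.length : Int)))
          if PySem.Chars.isIn q M && betterB td st.2 then some (p2, some td) else some st
      | _, _ => none
    | _, _, _, _ => none

def solution_alt (m : String) (musicinfos : List String) : String :=
  let q := changeB m.toList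
  match musicinfos.foldl (bodyB q) (some ("(None)".toList, none)) with
  | none => ""
  | some st => String.ofList st.1

-- ===== PRECONDITION & SPEC =====

-- Pre_ excludes exactly the inputs on which the Python raises: an entry with fewer than 4
-- comma fields (IndexError), a time that does not parse as 'int:int' (ValueError/IndexError),
-- or an empty melody with a nonnegative duration (ZeroDivisionError).
def PreEntry (i : String) : Bool :=
  match PySem.Chars.splitOn i.toList [','] with
  | p0 :: p1 :: _ :: p3 :: _ =>
    match timeto? p0, timeto? p1 with
    | some t0, some t1 => decide (p3 ≠ [] ∨ t1 - t0 < 0)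
    | _, _ => false
  | _ => false

def Pre_solution (m : String) (musicinfos : List String) : Prop :=
  ∀ i ∈ musicinfos, PreEntry i = true

instance (m : String) (musicinfos : List String) : Decidable (Pre_solution m musicinfos) := by
  unfold Pre_solution; infer_instance

def pvWitness_solution : String × List String :=
  ("ABC", ["10:00,10:06,WORLD,AB#CDE", "09:00,09:01,HELLO,CDEFGAB"])

def Spec_solution (m : String) (musicinfos : List String) (out : String) : Prop := out = solution_alt m musicinfos
instance (m : String) (musicinfos : List String) (out : String) : Decidable (Spec_solution m musicinfos out) := by unfold Spec_solution; infer_instance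

-- ===== CLAIM (what is proved, stated in full; the proofs are below) =====
def Claim_equal_solution : Prop := ∀ (m : String) (musicinfos : List String), Dom_solution m musicinfos → Pre_solution m musicinfos → Spec_solution m musicinfos (solution m musicinfos)

-- ===== LEMMAS AND PROOFS =====

-- a single Python replace with a 2-char pattern [x,'#'], as a plain recursion
def repS (x d : Char) : List Char → List Char
  | [] => []
  | [a] => [a]
  | a :: b :: r => if a = x ∧ b = '#' then d :: repS x d r else a :: repS x d (b :: r)

theorem replace_go_eq (x d : Char) : ∀ (fuel : Nat) (l acc : List Char), l.length ≤ fuel →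
    PySem.Chars.replace.go [x,'#'] [d] fuel l acc = acc.reverse ++ repS x d l := by
  intro fuel
  induction fuel with
  | zero =>
    intro l acc h
    have : l = [] := by cases l <;> simp_all
    subst this; simp [PySem.Chars.replace.go, repS]
  | succ n ih =>
    intro l acc h
    match l with
    | [] => simp [PySem.Chars.replace.go, repS]
    | [a] =>
      have hpre : ([x,'#'].isPrefixOf [a]) = false := by
        simp [List.isPrefixOf]
      rw [PySem.Chars.replace.go]
      simp only [hpre, Bool.false_eq_true, if_false]
      rw [ih [] (a :: acc) (by simp)]
      simp [repS]
    | a :: b :: r =>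
      rw [PySem.Chars.replace.go]
      by_cases hc : a = x ∧ b = '#'
      · have hpre : ([x,'#'].isPrefixOf (a :: b :: r)) = true := by
          simp [List.isPrefixOf, hc.1, hc.2]
        simp only [hpre, if_true]
        rw [show (a :: b :: r).drop [x,'#'].length = r by simp]
        rw [ih r ([d].reverse ++ acc) (by simp at h ⊢; omega)]
        simp [repS, hc]
      · have hpre : ([x,'#'].isPrefixOf (a :: b :: r)) = false := by
          simp [List.isPrefixOf]
          intro hax hb; exact absurd ⟨hax.symm, hb.symm⟩ hc
        simp only [hpre, Bool.false_eq_true, if_false]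
        rw [ih (b :: r) (a :: acc) (by simp at h ⊢; omega)]
        simp [repS, hc]

theorem replace_eq (x d : Char) (s : List Char) :
    PySem.Chars.replace s [x,'#'] [d] = repS x d s := by
  rw [PySem.Chars.replace]
  simp only [List.isEmpty]
  exact replace_go_eq x d s.length s [] (le_refl _)

theorem repS_cons_ne (x d a : Char) (s : List Char) (h : a ≠ x) :
    repS x d (a :: s) = a :: repS x d s := by
  cases s with
  | nil => rfl
  | cons b r => simp [repS, h]

theorem repS_cons_nosharp (x d a : Char) (s : List Char) (h : s.head? ≠ some '#') :
    repS x d (a :: s) = a :: repS x d s := by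
  cases s with
  | nil => rfl
  | cons b r =>
    have : b ≠ '#' := by simpa using h
    simp [repS, this]

theorem repS_head_nosharp (x d : Char) (s : List Char) (hd : d ≠ '#')
    (h : s.head? ≠ some '#') : (repS x d s).head? ≠ some '#' := by
  match s with
  | [] => simp [repS]
  | [a] => simpa [repS] using h
  | a :: b :: r =>
    have ha : a ≠ '#' := by simpa using h
    by_cases hc : a = x ∧ b = '#'
    · simp [repS, hc, hd]
    · simp [repS, hc, ha]

theorem repS_fire (x d : Char) (s : List Char) :
    repS x d (x :: '#' :: s) = d :: repS x d s := by
  simp [repS]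

-- the six replaces chained, in A's order
def chain (cs : List Char) : List Char :=
  repS 'B' '6' (repS 'A' '5' (repS 'G' '4' (repS 'F' '3' (repS 'D' '2' (repS 'C' '1' cs)))))

theorem chain_cons_notnote (a : Char) (s : List Char) (h : isNote a = false) :
    chain (a :: s) = a :: chain s := by
  simp only [isNote, Bool.or_eq_false_iff, decide_eq_false_iff_not] at h
  obtain ⟨⟨⟨⟨⟨h1, h2⟩, h3⟩, h4⟩, h5⟩, h6⟩
    : ((((a ≠ 'C' ∧ a ≠ 'D') ∧ a ≠ 'F') ∧ a ≠ 'G') ∧ a ≠ 'A') ∧ a ≠ 'B' := by tauto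
  unfold chain
  rw [repS_cons_ne _ _ _ _ h1, repS_cons_ne _ _ _ _ h2, repS_cons_ne _ _ _ _ h3,
      repS_cons_ne _ _ _ _ h4, repS_cons_ne _ _ _ _ h5, repS_cons_ne _ _ _ _ h6]

theorem chain_cons_nosharp (a : Char) (s : List Char) (h : s.head? ≠ some '#') :
    chain (a :: s) = a :: chain s := by
  have hC := repS_head_nosharp 'C' '1' s (by decide) h
  have hD := repS_head_nosharp 'D' '2' _ (by decide) hC
  have hF := repS_head_nosharp 'F' '3' _ (by decide) hD
  have hG := repS_head_nosharp 'G' '4' _ (by decide) hF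
  have hA := repS_head_nosharp 'A' '5' _ (by decide) hG
  unfold chain
  rw [repS_cons_nosharp _ _ _ _ h, repS_cons_nosharp _ _ _ _ hC, repS_cons_nosharp _ _ _ _ hD,
      repS_cons_nosharp _ _ _ _ hF, repS_cons_nosharp _ _ _ _ hG, repS_cons_nosharp _ _ _ _ hA]

theorem chain_cons_sharp (a : Char) (s : List Char) (h : isNote a = true) :
    chain ( a :: '#' :: s) = noteDigit a :: chain s := by
  have hsh : ∀ (x d : Char) (s' : List Char), x ≠ '#' → repS x d ('#' :: s') = '#' :: repS x d s' :=
    fun x d s' hx => repS_cons_ne x d '#' s' (by exact fun hh => hx hh.symm)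
  simp only [isNote, Bool.or_eq_true, decide_eq_true_eq] at h
  rcases h with ((((h | h) | h) | h) | h) | h <;> subst h <;> unfold chain
  · rw [repS_fire]
    rw [repS_cons_ne 'D' '2' _ _ (by decide), repS_cons_ne 'F' '3' _ _ (by decide),
        repS_cons_ne 'G' '4' _ _ (by decide), repS_cons_ne 'A' '5' _ _ (by decide),
        repS_cons_ne 'B' '6' _ _ (by decide)]
    rfl
  · rw [repS_cons_ne 'C' '1' _ _ (by decide), hsh 'C' '1' _ (by decide), repS_fire]
    rw [repS_cons_ne 'F' '3' _ _ (by decide), repS_cons_ne 'G' '4' _ _ (by decide),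
        repS_cons_ne 'A' '5' _ _ (by decide), repS_cons_ne 'B' '6' _ _ (by decide)]
    rfl
  · rw [repS_cons_ne 'C' '1' _ _ (by decide), hsh 'C' '1' _ (by decide),
        repS_cons_ne 'D' '2' _ _ (by decide), hsh 'D' '2' _ (by decide), repS_fire]
    rw [repS_cons_ne 'G' '4' _ _ (by decide), repS_cons_ne 'A' '5' _ _ (by decide),
        repS_cons_ne 'B' '6' _ _ (by decide)]
    rfl
  · rw [repS_cons_ne 'C' '1' _ _ (by decide), hsh 'C' '1' _ (by decide),
        repS_cons_ne 'D' '2' _ _ (by decide), hsh 'D' '2' _ (by decide),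
        repS_cons_ne 'F' '3' _ _ (by decide), hsh 'F' '3' _ (by decide), repS_fire]
    rw [repS_cons_ne 'A' '5' _ _ (by decide), repS_cons_ne 'B' '6' _ _ (by decide)]
    rfl
  · rw [repS_cons_ne 'C' '1' _ _ (by decide), hsh 'C' '1' _ (by decide),
        repS_cons_ne 'D' '2' _ _ (by decide), hsh 'D' '2' _ (by decide),
        repS_cons_ne 'F' '3' _ _ (by decide), hsh 'F' '3' _ (by decide),
        repS_cons_ne 'G' '4' _ _ (by decide), hsh 'G' '4' _ (by decide), repS_fire]
    rw [repS_cons_ne 'B' '6' _ _ (by decide)]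
    rfl
  · rw [repS_cons_ne 'C' '1' _ _ (by decide), hsh 'C' '1' _ (by decide),
        repS_cons_ne 'D' '2' _ _ (by decide), hsh 'D' '2' _ (by decide),
        repS_cons_ne 'F' '3' _ _ (by decide), hsh 'F' '3' _ (by decide),
        repS_cons_ne 'G' '4' _ _ (by decide), hsh 'G' '4' _ (by decide),
        repS_cons_ne 'A' '5' _ _ (by decide), hsh 'A' '5' _ (by decide), repS_fire]
    rfl

theorem chain_eq_scan (cs : List Char) : chain cs = scanSharp cs := by
  induction cs using scanSharp.induct with
  | case1 => rfl
  | case2 a => rfl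
  | case3 a b r hc ih =>
    rw [scanSharp]
    simp only [hc, if_true]
    have hb : b = '#' := by
      simp only [Bool.and_eq_true, beq_iff_eq] at hc; exact hc.2
    subst hb
    rw [chain_cons_sharp a r (by simp_all), ih]
  | case4 a b r hc ih =>
    rw [scanSharp]
    simp only [hc]
    by_cases hn : isNote a
    · have hb : b ≠ '#' := by
        intro hb; subst hb; simp [hn] at hc
      rw [chain_cons_nosharp a (b :: r) (by simpa using hb), ih]
      simp
    · rw [chain_cons_notnote a (b :: r) (by simpa using hn), ih]
      simp

theorem change_eq (cs : List Char) : changeA cs = changeB cs := by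
  show changeA cs = scanSharp cs
  rw [← chain_eq_scan]
  simp only [changeA, List.foldl]
  rw [replace_eq, replace_eq, replace_eq, replace_eq, replace_eq, replace_eq]
  rfl

theorem scanSharp_ne_nil (cs : List Char) (h : cs ≠ []) : scanSharp cs ≠ [] := by
  match cs with
  | [a] => simp [scanSharp]
  | a :: b :: r => rw [scanSharp]; split <;> simp

-- projection from A's accumulated list to B's (best_title, best_dur) state
def proj (a : List (Int × List Char)) : List Char × Option Int :=
  match PySem.List.sorted a (fun x => -x.1) false with
  | [] => ("(None)".toList, none)
  | p :: _ => (p.2, some p.1)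

theorem sorted_append_singleton (a : List (Int × List Char)) (p : Int × List Char) :
    PySem.List.sorted (a ++ [p]) (fun x => -x.1) false =
      PySem.List.insertBy (fun x y => decide ((-x.1 : Int) < -y.1)) p
        (PySem.List.sorted a (fun x => -x.1) false) := by
  rw [PySem.List.sorted_eq_foldl_insertBy, PySem.List.sorted_eq_foldl_insertBy]
  simp [List.foldl_append]

theorem proj_append (a : List (Int × List Char)) (td : Int) (t : List Char) :
    proj (a ++ [(td, t)]) =
      if betterB td (proj a).2 then (t, some td) else proj a := by
  unfold proj
  rw [sorted_append_singleton]
  cases h : PySem.List.sorted a (fun x => -x.1) false with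
  | nil => simp [PySem.List.insertBy, betterB]
  | cons q rest =>
    rw [PySem.List.insertBy]
    by_cases hlt : (q.1 : Int) < td
    · simp [betterB, hlt]
    · simp [betterB, hlt, show ¬((-td : Int) < -q.1) by omega]

-- under PreEntry, one A-step appends iff it matches, and B's step is its projection
theorem body_rel (m : String) (i : String) (hpre : PreEntry i = true)
    (a : List (Int × List Char)) :
    ∃ a', bodyA m (some a) i = some a' ∧
      bodyB (changeB m.toList) (some (proj a)) i = some (proj a') := by
  unfold PreEntry at hpre
  cases hp : PySem.Chars.splitOn i.toList [','] with
  | nil => rw [hp] at hpre; exact Bool.noConfusion hpre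
  | cons p0 ps0 =>
  cases ps0 with
  | nil => rw [hp] at hpre; exact Bool.noConfusion hpre
  | cons p1 ps1 =>
  cases ps1 with
  | nil => rw [hp] at hpre; exact Bool.noConfusion hpre
  | cons p2 ps2 =>
  cases ps2 with
  | nil => rw [hp] at hpre; exact Bool.noConfusion hpre
  | cons p3 rest =>
  rw [hp] at hpre
  have hpre2 : (match timeto? p0, timeto? p1 with
      | some t0, some t1 => decide (p3 ≠ [] ∨ t1 - t0 < 0)
      | _, _ => false) = true := hpre
  cases h0 : timeto? p0 with
  | none => cases h1 : timeto? p1 <;> rw [h0, h1] at hpre2 <;> exact Bool.noConfusion hpre2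
  | some t0 =>
  cases h1 : timeto? p1 with
  | none => rw [h0, h1] at hpre2; exact Bool.noConfusion hpre2
  | some t1 =>
  rw [h0, h1] at hpre2
  have hcond : p3 ≠ [] ∨ t1 - t0 < 0 := by simpa using hpre2
  have hguard : ¬((changeA p3).length = 0 ∧ 0 ≤ t1 - t0) := by
    rcases hcond with h | h
    · intro ⟨hl, _⟩
      rw [change_eq] at hl
      exact scanSharp_ne_nil p3 h (List.length_eq_zero_iff.mp hl)
    · intro ⟨_, hge⟩; omega
  have hguard' : ¬((changeB p3).length = 0 ∧ 0 ≤ t1 - t0) := by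
    rw [← change_eq]
    exact hguard
  have g0 : PySem.List.pyGet? (p0 :: p1 :: p2 :: p3 :: rest) (0 : Int) = some p0 := by
    simp only [PySem.List.pyGet?, PySem.List.pyIdx?, List.length_cons]
    split
    · split
      · simp [Int.toNat]
      · omega
    · omega
  have g1 : PySem.List.pyGet? (p0 :: p1 :: p2 :: p3 :: rest) (1 : Int) = some p1 := by
    simp only [PySem.List.pyGet?, PySem.List.pyIdx?, List.length_cons]
    split
    · split
      · simp [Int.toNat]
      · omega
    · omega
  have g2 : PySem.List.pyGet? (p0 :: p1 :: p2 :: p3 :: rest) (2 : Int) = some p2 := by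
    simp only [PySem.List.pyGet?, PySem.List.pyIdx?, List.length_cons]
    split
    · split
      · simp [Int.toNat]
      · omega
    · omega
  have g3 : PySem.List.pyGet? (p0 :: p1 :: p2 :: p3 :: rest) (3 : Int) = some p3 := by
    simp only [PySem.List.pyGet?, PySem.List.pyIdx?, List.length_cons]
    split
    · split
      · simp [Int.toNat]
      · omega
    · omega
  simp only [bodyA, bodyB, hp, g0, g1, g2, g3, h0, h1]
  simp only [if_neg hguard, if_neg hguard']
  have hM : (if (t1 - t0) < ((changeB p3).length : Int) then
        PySem.List.slice (changeB p3) none (some (t1 - t0))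
      else PySem.List.pyRepeat (changeB p3) (PySem.Int.floordiv (t1 - t0) ((changeB p3).length : Int)) ++
        PySem.List.slice (changeB p3) none (some (PySem.Int.mod (t1 - t0) ((changeB p3).length : Int)))) =
      (if (t1 - t0) ≥ ((changeA p3).length : Int) then
        PySem.List.pyRepeat (changeA p3) (PySem.Int.floordiv (t1 - t0) ((changeA p3).length : Int)) ++
          PySem.List.slice (changeA p3) none (some (PySem.Int.mod (t1 - t0) ((changeA p3).length : Int)))
      else PySem.List.slice (changeA p3) none (some (t1 - t0))) := by
    rw [change_eq p3]
    split_ifs with u v v <;> first | rfl | omega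
  rw [← change_eq m.toList]
  by_cases hin : PySem.Chars.isIn (changeA m.toList)
      (if (t1 - t0) ≥ ((changeA p3).length : Int) then
        PySem.List.pyRepeat (changeA p3) (PySem.Int.floordiv (t1 - t0) ((changeA p3).length : Int)) ++
          PySem.List.slice (changeA p3) none (some (PySem.Int.mod (t1 - t0) ((changeA p3).length : Int)))
      else PySem.List.slice (changeA p3) none (some (t1 - t0))) = true
  · refine ⟨a ++ [(t1 - t0, p2)], ?_, ?_⟩
    · rw [if_pos hin]
    · rw [hM, hin]
      simp only [Bool.true_and]
      rw [proj_append]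
      by_cases hb : betterB (t1 - t0) (proj a).2 = true
      · rw [if_pos hb, if_pos hb]
      · rw [if_neg hb, if_neg hb]
  · have hin' : PySem.Chars.isIn (changeA m.toList)
        (if (t1 - t0) ≥ ((changeA p3).length : Int) then
          PySem.List.pyRepeat (changeA p3) (PySem.Int.floordiv (t1 - t0) ((changeA p3).length : Int)) ++
            PySem.List.slice (changeA p3) none (some (PySem.Int.mod (t1 - t0) ((changeA p3).length : Int)))
        else PySem.List.slice (changeA p3) none (some (t1 - t0))) = false := by
      simpa using hin
    refine ⟨a, ?_, ?_⟩
    · rw [hin']; simp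
    · rw [hM, hin']; simp

theorem loop_rel (m : String) : ∀ (l : List String), (∀ i ∈ l, PreEntry i = true) →
    ∀ (a : List (Int × List Char)),
    ∃ b, l.foldl (bodyA m) (some a) = some b ∧
      l.foldl (bodyB (changeB m.toList)) (some (proj a)) = some (proj b) := by
  intro l
  induction l with
  | nil => intro _ a; exact ⟨a, rfl, rfl⟩
  | cons i rest ih =>
    intro hpre a
    obtain ⟨a', ha', hb'⟩ := body_rel m i (hpre i (by simp)) a
    obtain ⟨b, hb1, hb2⟩ := ih (fun j hj => hpre j (by simp [hj])) a'
    exact ⟨b, by simpa [ha'] using hb1, by simpa [hb'] using hb2⟩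

theorem proj_nil : proj [] = ("(None)".toList, none) := rfl

-- ===== VERDICT (by name: the statement is the Claim_ definition above) =====
theorem solution_spec : Claim_equal_solution := by
  intro m musicinfos _ hpre
  unfold Spec_solution solution solution_alt
  obtain ⟨b, hb1, hb2⟩ := loop_rel m musicinfos hpre []
  rw [proj_nil] at hb2
  simp only [hb1, hb2]
  cases hbn : b with
  | nil => simp [proj_nil]
  | cons p bs =>
    subst hbn
    have hne : PySem.List.sorted (p :: bs) (fun x => -x.1) false ≠ [] := by
      simpa using (PySem.List.sorted_eq_nil_iff (p :: bs) (fun x => -x.1) false).not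
    unfold proj
    cases hs : PySem.List.sorted (p :: bs) (fun x => -x.1) false with
    | nil => exact absurd hs (by simpa using hne)
    | cons q t => simp
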